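-- pv_equiv track=rewrite | github.com/RithwikYaramaneni/119--Myszkowiski-Cypher | Cia.py | get_column_order
-- ===== SOURCE A (Python) =====
-- def get_column_order(key):
--     """
--     Assign a rank to each column based on alphabetical order of key chars.
--     Duplicate letters share the same rank and are read together row-by-row.
--     """
--     sorted_chars = sorted(enumerate(key), key=lambda x: x[1])
--     rank = 0
--     order = [0] * len(key)
--     i = 0
--     while i < len(sorted_chars):
--         j = i
--         while j < len(sorted_chars) and sorted_chars[j][1] == sorted_chars[i][1]:
--             j += 1
--         for k in range(i, j):
--             order[sorted_chars[k][0]] = rank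
--         rank += 1
--         i = j
--     return order
-- ===== SOURCE B (Python) =====
-- def get_column_order(key):
--     """
--     Assign a rank to each column based on alphabetical order of key chars.
--     Duplicate letters share the same rank.
--     """
--     rank_map = {c: r for r, c in enumerate(sorted(set(key)))}
--     return [rank_map[c] for c in key]
-- ===== Notes on version B (the rewrite author's own statement) =====
-- stated objective: simpler
-- what changed: Replaces A's sort-of-(index,char)-pairs with grouping loop and positional write-back by a char-to-rank dict built once from sorted(set(key)) followed by a single mapping comprehension.
import Mathlib
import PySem

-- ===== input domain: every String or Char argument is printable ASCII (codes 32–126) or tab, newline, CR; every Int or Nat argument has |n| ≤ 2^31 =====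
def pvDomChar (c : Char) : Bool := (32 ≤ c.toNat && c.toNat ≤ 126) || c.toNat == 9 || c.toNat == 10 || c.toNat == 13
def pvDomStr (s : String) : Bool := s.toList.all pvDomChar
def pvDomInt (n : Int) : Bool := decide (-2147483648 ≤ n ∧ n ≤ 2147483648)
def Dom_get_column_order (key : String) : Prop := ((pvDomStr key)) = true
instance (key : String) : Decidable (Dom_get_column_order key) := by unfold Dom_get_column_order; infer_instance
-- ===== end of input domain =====

-- B replaces A's sorted-pairs grouping loop by a char→rank table from sorted(set(key)) plus one mapping pass (objective: simpler).

-- ===== PORT A =====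
-- inner while:  while j < len(s) and s[j][1] == s[i][1]: j += 1   (c is s[i][1], fixed during the scan)
def aInner (s : List (Int × Char)) (c : Char) (j : Nat) : Nat :=
  if h : j < s.length ∧ (PySem.List.pyGetD s (j : Int) ((0 : Int), 'a')).2 = c then
    aInner s c (j + 1)
  else j
termination_by s.length - j
decreasing_by omega

theorem aInner_ge (s : List (Int × Char)) (c : Char) (j : Nat) : j ≤ aInner s c j := by
  unfold aInner
  split
  · exact Nat.le_trans (Nat.le_succ j) (aInner_ge s c (j + 1))
  · exact Nat.le_refl j
termination_by s.length - j
decreasing_by omega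

theorem aInner_lt (s : List (Int × Char)) (i : Nat) (h : i < s.length) :
    i < aInner s (PySem.List.pyGetD s (i : Int) ((0 : Int), 'a')).2 i := by
  rw [aInner]
  rw [dif_pos ⟨h, rfl⟩]
  exact Nat.lt_of_lt_of_le (Nat.lt_succ_self i) (aInner_ge _ _ _)

-- outer while over i; the group [i, j) is written rank via 'for k in range(i, j)'
def aOuter (s : List (Int × Char)) (order : List Int) (rank : Int) (i : Nat) : List Int :=
  if h : i < s.length then
    let c := (PySem.List.pyGetD s (i : Int) ((0 : Int), 'a')).2
    let j := aInner s c i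
    let order' := (PySem.List.pyRange (i : Int) (j : Int) 1).foldl
        (fun o k => PySem.List.pySetD o (PySem.List.pyGetD s k ((0 : Int), 'a')).1 rank) order
    aOuter s order' (rank + 1) j
  else order
termination_by s.length - i
decreasing_by have := aInner_lt s i h; omega

def get_column_order (key : String) : List Int :=
  let s := PySem.List.sorted (PySem.List.enumerate key.toList 0) (fun x => x.2) false
  aOuter s (List.replicate key.toList.length 0) 0 0

-- ===== PORT B =====
-- rank_map = {c: r for r, c in enumerate(sorted(set(key)))}
def bDict (u : List Char) : PySem.Dict Char Int :=
  (PySem.List.enumerate u 0).foldl (fun d p => PySem.Dict.insert d p.2 p.1) PySem.Dict.empty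

-- rank_map[c]: every c of key is a key of rank_map, so the KeyError branch is unreachable and '.getD 0' is exact
def get_column_order_alt (key : String) : List Int :=
  let u := PySem.List.sorted (PySem.Set.ofList key.toList) (fun c => c) false
  let d := bDict u
  key.toList.map (fun c => (PySem.Dict.get? d c).getD 0)

-- ===== PRECONDITION & SPEC =====
def Spec_get_column_order (key : String) (out : List Int) : Prop := out = get_column_order_alt key
instance (key : String) (out : List Int) : Decidable (Spec_get_column_order key out) := by unfold Spec_get_column_order; infer_instance

-- ===== CLAIM (what is proved, stated in full; the proofs are below) =====
def Claim_equal_get_column_order : Prop := ∀ (key : String), Dom_get_column_order key → Spec_get_column_order key (get_column_order key)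

-- ===== LEMMAS AND PROOFS =====

-- the sorted (index, char) list A works on, and the rank function both sides compute
def sOf (L : List Char) : List (Int × Char) :=
  PySem.List.sorted (PySem.List.enumerate L 0) (fun x => x.2) false

def rkOf (L : List Char) (c : Char) : Int :=
  ((PySem.List.sorted (PySem.Set.ofList L) (fun x => x) false).countP (fun d => decide (d < c)) : Int)

-- basic facts about sOf
theorem sOf_elem (L : List Char) (k : Nat) (hk : k < (sOf L).length) :
    ∃ (m : Nat) (hm : m < L.length), (sOf L)[k] = ((m : Int), L[m]) := by
  have hmem : (sOf L)[k] ∈ sOf L := List.getElem_mem hk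
  have : (sOf L)[k] ∈ PySem.List.enumerate L 0 :=
    (PySem.List.mem_sorted _ _ _ _).mp hmem
  rw [PySem.List.mem_enumerate_iff] at this
  obtain ⟨m, hm, hEq⟩ := this
  exact ⟨m, hm, by simpa using hEq⟩

theorem sOf_mono (L : List Char) (k m : Nat) (hkm : k ≤ m) (hm : m < (sOf L).length) :
    ((sOf L)[k]'(Nat.lt_of_le_of_lt hkm hm)).2 ≤ ((sOf L)[m]).2 :=
  PySem.List.key_sorted_getElem_mono (key := fun x => x.2) (xs := PySem.List.enumerate L 0) hkm hm

theorem sOf_fst_nodup (L : List Char) : ((sOf L).map (·.1)).Nodup := by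
  have hperm : (sOf L).Perm (PySem.List.enumerate L 0) := PySem.List.sorted_perm _ _ _
  have : ((sOf L).map (·.1)).Perm ((PySem.List.enumerate L 0).map (·.1)) := hperm.map _
  refine this.nodup_iff.mpr ?_
  rw [PySem.List.map_fst_enumerate]
  exact PySem.List.nodup_pyRange_one _ _

theorem sOf_fst_ne (L : List Char) (k m : Nat) (hk : k < (sOf L).length)
    (hm : m < (sOf L).length) (hne : k ≠ m) : ((sOf L)[k]).1 ≠ ((sOf L)[m]).1 := by
  have hnd := sOf_fst_nodup L
  have h1 : ((sOf L).map (·.1))[k]'(by simpa using hk) ≠ ((sOf L).map (·.1))[m]'(by simpa using hm) := by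
    intro hEq
    exact hne ((List.Nodup.getElem_inj_iff hnd).mp hEq)
  simpa using h1

theorem sOf_char_mem (L : List Char) (c : Char) :
    c ∈ L ↔ ∃ (k : Nat) (hk : k < (sOf L).length), ((sOf L)[k]).2 = c := by
  have hperm : (sOf L).Perm (PySem.List.enumerate L 0) := PySem.List.sorted_perm _ _ _
  have hmap : ((sOf L).map (·.2)).Perm L := by
    have := hperm.map (·.2)
    rwa [PySem.List.map_snd_enumerate] at this
  constructor
  · intro hc
    have : c ∈ (sOf L).map (·.2) := hmap.mem_iff.mpr hc
    obtain ⟨q, hq, hEq⟩ := List.mem_map.mp this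
    obtain ⟨k, hk, hqk⟩ := List.mem_iff_getElem.mp hq
    exact ⟨k, hk, by rw [hqk]; exact hEq⟩
  · rintro ⟨k, hk, hEq⟩
    have : ((sOf L)[k]).2 ∈ (sOf L).map (·.2) := List.mem_map_of_mem (List.getElem_mem hk)
    rw [hEq] at this
    exact hmap.mem_iff.mp this

-- counting helper: split a count into two disjoint counts
theorem countP_split {α : Type} (p q r : α → Bool) :
    ∀ (l : List α), (∀ d ∈ l, p d = (q d || r d) ∧ (q d && r d) = false) →
      l.countP p = l.countP q + l.countP r := by
  intro l
  induction l with
  | nil => intro _; simp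
  | cons x t ih =>
    intro h
    have hx := h x (by simp)
    have ht := ih (fun d hd => h d (by simp [hd]))
    simp only [List.countP_cons, ht]
    cases hq : q x <;> cases hr : r x <;> simp [hq, hr] at hx ⊢ <;> simp [hx] <;> omega

-- rank facts: the minimum char has rank 0, adjacent distinct chars differ by 1
theorem rk_zero (L : List Char) (c : Char) (hmin : ∀ d ∈ L, c ≤ d) : rkOf L c = 0 := by
  unfold rkOf
  have : (PySem.List.sorted (PySem.Set.ofList L) (fun x => x) false).countP
      (fun d => decide (d < c)) = 0 := by
    rw [List.countP_eq_zero]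
    intro d hd
    have hdL : d ∈ L := by
      have hdset : d ∈ PySem.Set.ofList L := (PySem.List.mem_sorted _ _ _ _).mp hd
      exact (PySem.Set.mem_ofList _ _).mp hdset
    simp [Char.not_lt.mpr (hmin d hdL)]
  simp [this]

theorem rk_succ (L : List Char) (c c' : Char) (hc : c ∈ L) (hlt : c < c')
    (hsep : ∀ d ∈ L, d ≤ c ∨ c' ≤ d) : rkOf L c' = rkOf L c + 1 := by
  unfold rkOf
  set u := PySem.List.sorted (PySem.Set.ofList L) (fun x => x) false with hu
  have humem : ∀ d, d ∈ u ↔ d ∈ L := by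
    intro d
    rw [PySem.List.mem_sorted, PySem.Set.mem_ofList]
  have hnd : u.Nodup := by
    exact (PySem.List.sorted_ofList_pairwise_lt L).nodup
  have hsplit : u.countP (fun d => decide (d < c')) =
      u.countP (fun d => decide (d < c)) + u.countP (fun d => decide (d = c)) := by
    apply countP_split
    intro d hd
    have hdL := (humem d).mp hd
    rcases hsep d hdL with h | h
    · constructor
      · rcases lt_or_eq_of_le h with h1 | h1
        · simp [h1, lt_trans h1 hlt]
        · simp [h1, hlt]
      · rcases lt_or_eq_of_le h with h1 | h1
        · simp [h1, ne_of_lt h1]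
        · simp [h1]
    · have h1 : ¬ d < c' := not_lt.mpr h
      have h2 : ¬ d < c := not_lt.mpr (le_trans (le_of_lt hlt) h)
      have h3 : d ≠ c := by rintro rfl; exact absurd hlt (not_lt.mpr h)
      simp [h1, h2, h3]
  have hcount : u.countP (fun d => decide (d = c)) = 1 := by
    have hcu : c ∈ u := (humem c).mpr hc
    have : u.countP (fun d => decide (d = c)) = u.count c := by
      rw [List.count_eq_countP]
      apply List.countP_congr
      intro d _
      by_cases h : d = c
      · simp [h]
      · simp [h]
    rw [this]
    exact List.count_eq_one_of_mem hnd hcu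
  rw [hsplit, hcount]
  push_cast
  ring

-- B-side: looking up c in the rank dict gives its index in u
theorem get?_bfold_not_mem (u : List Char) (c : Char) :
    ∀ (r : Int) (d : PySem.Dict Char Int), c ∉ u →
      PySem.Dict.get? ((PySem.List.enumerate u r).foldl
        (fun d p => PySem.Dict.insert d p.2 p.1) d) c = PySem.Dict.get? d c := by
  induction u with
  | nil => intro r d _; simp [PySem.List.enumerate_nil]
  | cons x t ih =>
    intro r d hc
    rw [PySem.List.enumerate_cons]
    simp only [List.foldl_cons]
    rw [ih (r + 1) _ (fun h => hc (List.mem_cons_of_mem _ h))]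
    exact PySem.Dict.get?_insert_of_ne _ _ (fun h => hc (by simp [h]))

theorem get?_bfold (u : List Char) (c : Char) :
    ∀ (r : Int) (d : PySem.Dict Char Int), u.Nodup → c ∈ u →
      PySem.Dict.get? ((PySem.List.enumerate u r).foldl
        (fun d p => PySem.Dict.insert d p.2 p.1) d) c = some (r + (u.idxOf c : Int)) := by
  induction u with
  | nil => intro r d _ hc; simp at hc
  | cons x t ih =>
    intro r d hnd hc
    rw [PySem.List.enumerate_cons]
    simp only [List.foldl_cons]
    by_cases hcx : c = x
    · subst hcx
      have hct : c ∉ t := (List.nodup_cons.mp hnd).1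
      rw [get?_bfold_not_mem t c (r + 1) _ hct]
      rw [PySem.Dict.get?_insert_self]
      simp [List.idxOf_cons_self]
    · have hct : c ∈ t := by
        rcases List.mem_cons.mp hc with h | h
        · exact absurd h hcx
        · exact h
      rw [ih (r + 1) _ (List.nodup_cons.mp hnd).2 hct]
      have hxnc : (x == c) = false := by simp; exact fun h => hcx h.symm
      have : (x :: t).idxOf c = t.idxOf c + 1 := by
        rw [List.idxOf_cons, hxnc]; rfl
      rw [this]
      push_cast
      ring_nf

-- in a strictly increasing list the index of c is the number of elements below c
theorem idxOf_eq_countP (u : List Char) (c : Char) (hp : u.Pairwise (· < ·)) (hc : c ∈ u) :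
    u.idxOf c = u.countP (fun d => decide (d < c)) := by
  induction u with
  | nil => simp at hc
  | cons x t ih =>
    rw [List.pairwise_cons] at hp
    by_cases hcx : c = x
    · subst hcx
      have : t.countP (fun d => decide (d < c)) = 0 := by
        rw [List.countP_eq_zero]
        intro d hd
        simp [not_lt.mpr (le_of_lt (hp.1 d hd))]
      simp [List.idxOf_cons_self, this]
    · have hct : c ∈ t := by
        rcases List.mem_cons.mp hc with h | h
        · exact absurd h hcx
        · exact h
      have hxc : x < c := hp.1 c hct
      rw [List.countP_cons]
      have hxnc : (x == c) = false := by simp; exact fun h => hcx h.symm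
      have : (x :: t).idxOf c = t.idxOf c + 1 := by
        rw [List.idxOf_cons, hxnc]; rfl
      rw [this, ih hp.2 hct]
      simp [hxc]

-- B computes rkOf at every character of the key
theorem alt_eq_map_rk (key : String) :
    get_column_order_alt key = key.toList.map (fun c => rkOf key.toList c) := by
  unfold get_column_order_alt
  apply List.map_congr_left
  intro c hc
  set u := PySem.List.sorted (PySem.Set.ofList key.toList) (fun x => x) false with hu
  have hpl : u.Pairwise (· < ·) := PySem.List.sorted_ofList_pairwise_lt _
  have hnd : u.Nodup := hpl.nodup
  have hcu : c ∈ u := by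
    rw [PySem.List.mem_sorted, PySem.Set.mem_ofList]; exact hc
  unfold bDict
  rw [get?_bfold u c 0 PySem.Dict.empty hnd hcu]
  rw [idxOf_eq_countP u c hpl hcu]
  simp [rkOf, hu]

-- A-side helper lemmas --------------------------------------------------------

-- non-dependent access to the sorted pair list
def sget (L : List Char) (k : Nat) : Int × Char := (sOf L).getD k ((0 : Int), 'a')

theorem sget_eq (L : List Char) (k : Nat) (hk : k < (sOf L).length) :
    sget L k = (sOf L)[k] := List.getD_eq_getElem _ _ hk

theorem sget_elem (L : List Char) (k : Nat) (hk : k < (sOf L).length) :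
    ∃ (m : Nat) (hm : m < L.length), sget L k = ((m : Int), L[m]) := by
  obtain ⟨m, hm, hEq⟩ := sOf_elem L k hk
  exact ⟨m, hm, by rw [sget_eq L k hk, hEq]⟩

theorem sget_mono (L : List Char) (k m : Nat) (hkm : k ≤ m) (hm : m < (sOf L).length) :
    (sget L k).2 ≤ (sget L m).2 := by
  rw [sget_eq L k (Nat.lt_of_le_of_lt hkm hm), sget_eq L m hm]
  exact sOf_mono L k m hkm hm

theorem sget_fst_ne (L : List Char) (k m : Nat) (hk : k < (sOf L).length)
    (hm : m < (sOf L).length) (hne : k ≠ m) : (sget L k).1 ≠ (sget L m).1 := by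
  rw [sget_eq L k hk, sget_eq L m hm]
  exact sOf_fst_ne L k m hk hm hne

theorem sget_char_mem (L : List Char) (c : Char) :
    c ∈ L ↔ ∃ (k : Nat), k < (sOf L).length ∧ (sget L k).2 = c := by
  rw [sOf_char_mem L c]
  constructor
  · rintro ⟨k, hk, hEq⟩
    exact ⟨k, hk, by rw [sget_eq L k hk]; exact hEq⟩
  · rintro ⟨k, hk, hEq⟩
    exact ⟨k, hk, by rw [← sget_eq L k hk]; exact hEq⟩

theorem aInner_spec (s : List (Int × Char)) (c : Char) (j : Nat) (hj : j ≤ s.length) :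
    aInner s c j ≤ s.length ∧
    (∀ k, j ≤ k → k < aInner s c j →
      k < s.length ∧ (s.getD k ((0 : Int), 'a')).2 = c) ∧
    (aInner s c j < s.length → (s.getD (aInner s c j) ((0 : Int), 'a')).2 ≠ c) := by
  rw [aInner]
  split
  · rename_i hcond
    obtain ⟨hjl, hc⟩ := hcond
    rw [PySem.List.pyGetD_natCast] at hc
    have hrec := aInner_spec s c (j + 1) hjl
    refine ⟨hrec.1, ?_, hrec.2.2⟩
    intro kk hk1 hk2
    by_cases hkj : kk = j
    · subst hkj
      exact ⟨hjl, hc⟩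
    · exact hrec.2.1 kk (by omega) hk2
  · rename_i hcond
    rw [Classical.not_and_iff_not_or_not] at hcond
    refine ⟨hj, ?_, ?_⟩
    · intro k hk1 hk2; omega
    · intro h
      rcases hcond with h1 | h1
      · exact absurd h h1
      · rw [PySem.List.pyGetD_natCast] at h1
        exact h1
termination_by s.length - j
decreasing_by omega

-- the 'for k in range(i, j)' fold over indices is a fold over the segment s[i:j]
theorem range_fold (s : List (Int × Char)) (rank : Int) :
    ∀ (i j : Nat), i ≤ j → j ≤ s.length → ∀ (order : List Int),
      (PySem.List.pyRange (i : Int) (j : Int) 1).foldl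
        (fun o k => PySem.List.pySetD o (PySem.List.pyGetD s k ((0 : Int), 'a')).1 rank) order =
      ((s.drop i).take (j - i)).foldl (fun o q => PySem.List.pySetD o q.1 rank) order := by
  intro i j hij hj
  induction hd : j - i generalizing i with
  | zero =>
    intro order
    have : i = j := by omega
    subst this
    rw [PySem.List.pyRange_one_eq_nil (by omega)]
    simp
  | succ m ih =>
    intro order
    have hij' : i < j := by omega
    have hil : i < s.length := by omega
    rw [PySem.List.pyRange_one_cons (by exact_mod_cast hij')]
    simp only [List.foldl_cons]
    have hget : PySem.List.pyGetD s (i : Int) ((0 : Int), 'a') = s[i] := by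
      rw [PySem.List.pyGetD_natCast, List.getD_eq_getElem _ _ hil]
    have hcast : ((i : Int) + 1) = ((i + 1 : Nat) : Int) := by push_cast; ring
    rw [hget, hcast, ih (i + 1) (by omega) (by omega)]
    have hseg : (s.drop i).take (m + 1) = s[i] :: ((s.drop (i + 1)).take m) := by
      rw [List.drop_eq_getElem_cons hil, List.take_succ_cons]
    rw [hseg]
    simp

-- effect of the write-back fold on length and getD
theorem writes_length (seg : List (Int × Char)) (rank : Int) :
    ∀ (order : List Int),
      (seg.foldl (fun o q => PySem.List.pySetD o q.1 rank) order).length = order.length := by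
  induction seg with
  | nil => intro order; simp
  | cons q t ih =>
    intro order
    simp only [List.foldl_cons]
    rw [ih]
    exact PySem.List.length_pySetD _ _ _

theorem writes_getD (seg : List (Int × Char)) (rank : Int) :
    ∀ (order : List Int) (p : Nat), p < order.length → (∀ q ∈ seg, 0 ≤ q.1) →
      (seg.foldl (fun o q => PySem.List.pySetD o q.1 rank) order).getD p 0 =
        if seg.any (fun q => q.1 == (p : Int)) then rank else order.getD p 0 := by
  induction seg with
  | nil => intro order p _ _; simp
  | cons q t ih =>
    intro order p hp hpos
    simp only [List.foldl_cons, List.any_cons]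
    have hq0 : 0 ≤ q.1 := hpos q (by simp)
    have hset : PySem.List.pySetD order q.1 rank = order.set q.1.toNat rank :=
      PySem.List.pySetD_of_nonneg order rank hq0
    rw [hset, ih _ p (by simpa using hp) (fun x hx => hpos x (by simp [hx]))]
    by_cases hqp : q.1 == (p : Int)
    · have hqp' : q.1.toNat = p := by
        have : q.1 = (p : Int) := by exact_mod_cast eq_of_beq hqp
        simp [this]
      by_cases ht : t.any (fun q => q.1 == (p : Int))
      · simp [ht, hqp]
      · simp only [ht, Bool.false_eq_true, if_false, hqp, Bool.true_or, if_true]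
        rw [hqp']
        rw [List.getD_eq_getElem _ _ (by simpa using hp)]
        simp [List.getElem_set_self]
    · have hqp' : q.1.toNat ≠ p := by
        intro hEq
        apply hqp
        have : q.1 = (p : Int) := by omega
        simp [this]
      by_cases ht : t.any (fun q => q.1 == (p : Int))
      · simp [ht, hqp]
      · simp only [ht, Bool.false_eq_true, if_false, hqp, Bool.false_or]
        rw [List.getD_eq_getElem _ _ (by simpa using hp), List.getD_eq_getElem _ _ hp]
        simp [List.getElem_set_ne hqp']

-- unfolding equations for aOuter
theorem aOuter_eq_pos (s : List (Int × Char)) (order : List Int) (rank : Int) (i : Nat)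
    (h : i < s.length) :
    aOuter s order rank i =
      aOuter s
        ((PySem.List.pyRange (i : Int)
            ((aInner s (PySem.List.pyGetD s (i : Int) ((0 : Int), 'a')).2 i : Nat) : Int) 1).foldl
          (fun o k => PySem.List.pySetD o (PySem.List.pyGetD s k ((0 : Int), 'a')).1 rank) order)
        (rank + 1) (aInner s (PySem.List.pyGetD s (i : Int) ((0 : Int), 'a')).2 i) := by
  rw [aOuter, dif_pos h]

theorem aOuter_eq_neg (s : List (Int × Char)) (order : List Int) (rank : Int) (i : Nat)
    (h : ¬ i < s.length) : aOuter s order rank i = order := by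
  rw [aOuter, dif_neg h]

-- main invariant for A's outer loop
theorem aOuter_correct (L : List Char) :
    ∀ (dfuel : Nat) (i : Nat) (rank : Int) (order : List Int),
      (sOf L).length - i = dfuel →
      i ≤ (sOf L).length →
      order.length = L.length →
      (i < (sOf L).length → rank = rkOf L ((sget L i).2)) →
      (∀ k, k < i → i < (sOf L).length → (sget L k).2 < (sget L i).2) →
      (∀ k, k < i → k < (sOf L).length →
        order.getD ((sget L k).1).toNat 0 = rkOf L ((sget L k).2)) →
      (aOuter (sOf L) order rank i).length = L.length ∧
      ∀ k, k < (sOf L).length →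
        (aOuter (sOf L) order rank i).getD ((sget L k).1).toNat 0 = rkOf L ((sget L k).2) := by
  intro dfuel
  induction dfuel using Nat.strong_induction_on with
  | _ dfuel IH =>
    intro i rank order hfuel hi hlen hrank hbound horder
    by_cases hil : i < (sOf L).length
    · rw [aOuter_eq_pos (sOf L) order rank i hil]
      have hcEq : (PySem.List.pyGetD (sOf L) (i : Int) ((0 : Int), 'a')).2 = (sget L i).2 := by
        rw [PySem.List.pyGetD_natCast]; rfl
      rw [hcEq]
      set c := (sget L i).2 with hc
      set j := aInner (sOf L) c i with hj
      have hspec := aInner_spec (sOf L) c i (le_of_lt hil)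
      have hjlen : j ≤ (sOf L).length := hspec.1
      have hij : i < j := by
        have := aInner_lt (sOf L) i hil
        rw [PySem.List.pyGetD_natCast] at this
        exact this
      have hgroup : ∀ k, i ≤ k → k < j → k < (sOf L).length ∧ (sget L k).2 = c := hspec.2.1
      have hstop : j < (sOf L).length → (sget L j).2 ≠ c := hspec.2.2
      rw [range_fold (sOf L) rank i j (le_of_lt hij) hjlen order]
      set seg := ((sOf L).drop i).take (j - i) with hsegdef
      set order' := seg.foldl (fun o q => PySem.List.pySetD o q.1 rank) order with horder'
      have hseglen : seg.length = j - i := by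
        rw [hsegdef, List.length_take, List.length_drop]
        omega
      have hsegget : ∀ t, t < j - i → seg.getD t ((0 : Int), 'a') = sget L (i + t) := by
        intro t ht
        rw [List.getD_eq_getElem _ _ (by omega : t < seg.length)]
        rw [sget, List.getD_eq_getElem _ _ (by omega : i + t < (sOf L).length)]
        simp only [hsegdef, List.getElem_take, List.getElem_drop]
      have hsegmem : ∀ q ∈ seg, ∃ t, t < j - i ∧ q = sget L (i + t) := by
        intro q hq
        obtain ⟨t, ht, hqt⟩ := List.mem_iff_getElem.mp hq
        rw [hseglen] at ht
        refine ⟨t, ht, ?_⟩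
        rw [← hsegget t ht, List.getD_eq_getElem _ _ (by omega : t < seg.length), hqt]
      have hsegpos : ∀ q ∈ seg, 0 ≤ q.1 := by
        intro q hq
        obtain ⟨t, ht, hqt⟩ := hsegmem q hq
        obtain ⟨m, hm, hsm⟩ := sget_elem L (i + t) (by omega)
        rw [hqt, hsm]
        simp
      have hlen' : order'.length = L.length := by rw [horder', writes_length, hlen]
      -- every char strictly before the group is below c, the group is exactly c
      have hcharle : ∀ k, k < j → k < (sOf L).length → (sget L k).2 ≤ c := by
        intro k hkj hk
        by_cases hki : k < i
        · exact le_of_lt ((hbound k hki hil))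
        · exact le_of_eq (hgroup k (by omega) hkj).2
      have hcltj : j < (sOf L).length → c < (sget L j).2 := by
        intro hjl
        have hgrp := hgroup (j - 1) (by omega) (by omega)
        have hle : (sget L (j-1)).2 ≤ (sget L j).2 := sget_mono L (j-1) j (by omega) hjl
        rw [hgrp.2] at hle
        exact lt_of_le_of_ne hle (fun h => hstop hjl h.symm)
      have hcmem : c ∈ L := by
        rw [sget_char_mem L c]
        exact ⟨i, hil, rfl⟩
      -- order' is correct on [0, j)
      have horder2 : ∀ k, k < j → k < (sOf L).length →
          order'.getD ((sget L k).1).toNat 0 = rkOf L ((sget L k).2) := by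
        intro k hkj hk
        obtain ⟨m, hm, hsm⟩ := sget_elem L k hk
        have hplt : ((sget L k).1).toNat < order.length := by
          rw [hsm, hlen]
          simpa using hm
        rw [horder', writes_getD seg rank order _ hplt hsegpos]
        by_cases hki : k < i
        · have hany : seg.any (fun q => q.1 == (((sget L k).1).toNat : Int)) = false := by
            rw [List.any_eq_false]
            intro q hq
            obtain ⟨t, ht, hqt⟩ := hsegmem q hq
            have hne : (sget L (i+t)).1 ≠ (sget L k).1 :=
              sget_fst_ne L (i+t) k (by omega) hk (by omega)
            rw [hqt]
            simp only [beq_iff_eq]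
            intro hEq
            apply hne
            rw [hEq, hsm]
            simp
          rw [hany]
          simp only [Bool.false_eq_true, if_false]
          exact horder k hki hk
        · have hany : seg.any (fun q => q.1 == (((sget L k).1).toNat : Int)) = true := by
            rw [List.any_eq_true]
            refine ⟨sget L k, ?_, ?_⟩
            · have := hsegget (k - i) (by omega)
              have hidx : i + (k - i) = k := by omega
              rw [hidx] at this
              rw [← this, List.getD_eq_getElem _ _ (by omega : k - i < seg.length)]
              exact List.getElem_mem _
            · rw [hsm]; simp
          rw [hany, if_pos rfl]
          rw [(hgroup k (by omega) hkj).2, hc]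
          exact hrank hil
      -- induction hypothesis at j
      refine IH ((sOf L).length - j) (by omega) j (rank + 1) order' rfl hjlen hlen' ?_ ?_ horder2
      · intro hjl
        have hsep : ∀ d ∈ L, d ≤ c ∨ (sget L j).2 ≤ d := by
          intro d hd
          rw [sget_char_mem L d] at hd
          obtain ⟨k, hk, hkd⟩ := hd
          by_cases hkj : k < j
          · left; rw [← hkd]; exact hcharle k hkj hk
          · right; rw [← hkd]
            exact sget_mono L j k (by omega) hk
        have hr := hrank hil
        rw [rk_succ L c ((sget L j).2) hcmem (hcltj hjl) hsep, hr]
      · intro k hkj hjl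
        exact lt_of_le_of_lt (hcharle k hkj (by omega)) (hcltj hjl)
    · rw [aOuter_eq_neg (sOf L) order rank i hil]
      refine ⟨hlen, ?_⟩
      intro k hk
      exact horder k (by omega) hk

-- ===== assembling the equivalence =====

theorem a_eq_map_rk (key : String) :
    get_column_order key = key.toList.map (fun c => rkOf key.toList c) := by
  set L := key.toList with hL
  have hmain := aOuter_correct L ((sOf L).length) 0 0 (List.replicate L.length 0)
      (by omega) (by omega) (by simp)
      ?_ ?_ ?_
  · obtain ⟨hlen, hget⟩ := hmain
    have hunf : get_column_order key = aOuter (sOf L) (List.replicate L.length 0) 0 0 := by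
      unfold get_column_order sOf
      rfl
    rw [hunf]
    apply List.ext_getElem
    · simp [hlen]
    · intro p hp1 hp2
      simp only [List.getElem_map]
      have hpL : p < L.length := by simpa using hp2
      have hmem : ((p : Int), L[p]) ∈ sOf L := by
        rw [sOf, PySem.List.mem_sorted, PySem.List.mem_enumerate_iff]
        exact ⟨p, hpL, by simp⟩
      obtain ⟨k, hk, hkEq⟩ := List.mem_iff_getElem.mp hmem
      have hsk : sget L k = ((p : Int), L[p]) := by
        rw [sget_eq L k hk, hkEq]
      have hres := hget k hk
      rw [hsk] at hres
      simp only [Int.toNat_natCast] at hres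
      rw [List.getD_eq_getElem _ _ (by omega : p < (aOuter (sOf L) (List.replicate L.length 0) 0 0).length)] at hres
      simpa using hres
  · intro hi
    have hmin : ∀ d ∈ L, (sget L 0).2 ≤ d := by
      intro d hd
      rw [sget_char_mem L d] at hd
      obtain ⟨k, hk, hkd⟩ := hd
      rw [← hkd]
      exact sget_mono L 0 k (Nat.zero_le k) hk
    exact (rk_zero L _ hmin).symm
  · intro k hk0 _; omega
  · intro k hk0 _; omega

-- ===== VERDICT (by name: the statement is the Claim_ definition above) =====
theorem get_column_order_spec : Claim_equal_get_column_order := by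
  intro key _
  unfold Spec_get_column_order
  rw [a_eq_map_rk, alt_eq_map_rk]
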